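-- pv_equiv track=rewrite | github.com/PolinaKochneva/calculator | calc.py | validate_tokens
-- ===== SOURCE A (Python) =====
-- def validate_tokens(tokens):
--     if not tokens:
--         return None
--     elif tokens[0][0] == 'operator':
--         return None
--     elif tokens[-1][0] == 'operator':
--         return None
--
--     for i in range(len(tokens)-1):
--         current_token = tokens[i][0]
--         next_token =tokens[i+1][0]
--
--         # Число перед открывающей скобкой
--         if current_token == 'number' and next_token == 'parenthesis' and tokens[i+1][1] == '(':
--             return None
--
--         # Закрывающая скобка перед числом
--         if current_token == 'parenthesis' and tokens[i][1] == ')' and next_token == 'number':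
--             return None
--
--         # Оператор перед закрывающей скобкой
--         if current_token == 'operator' and next_token == 'parenthesis' and tokens[i+1][1] == ')':
--             return None
--
--         # Открывающая скобка перед оператором
--         if current_token == 'parenthesis' and tokens[i][1] == '(' and next_token == 'operator':
--             return None
--
--         # Число перед числом (без операции)
--         if current_token == 'number' and next_token == 'number':
--             return None
--
--         #Два оператора подряд
--         if current_token == 'operator' and next_token == 'operator':
--             return None
--
--     return tokens
-- ===== SOURCE B (Python) =====
-- FORBIDDEN = ("n(", ")n", "o)", "(o", "nn", "oo")
--
--
-- def _cat(tok):
--     t = tok[0]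
--     if t == 'number':
--         return 'n'
--     if t == 'operator':
--         return 'o'
--     if t == 'parenthesis' and tok[1] == '(':
--         return '('
--     if t == 'parenthesis' and tok[1] == ')':
--         return ')'
--     return '?'
--
--
-- def validate_tokens(tokens):
--     s = ''.join(map(_cat, tokens))
--     if not s or s[0] == 'o' or s[-1] == 'o':
--         return None
--     if any(pat in s for pat in FORBIDDEN):
--         return None
--     return tokens
-- ===== Notes on version B (the rewrite author's own statement) =====
-- stated objective: alternative
-- what changed: B first compiles the token list into a category string (one char per token: n/o/(/)/?) and then validates that string alone: empty or boundary 'o' checks plus a substring search for six forbidden two-character digrams, instead of A's branch cascade over indexed token pairs.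
import Mathlib
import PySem

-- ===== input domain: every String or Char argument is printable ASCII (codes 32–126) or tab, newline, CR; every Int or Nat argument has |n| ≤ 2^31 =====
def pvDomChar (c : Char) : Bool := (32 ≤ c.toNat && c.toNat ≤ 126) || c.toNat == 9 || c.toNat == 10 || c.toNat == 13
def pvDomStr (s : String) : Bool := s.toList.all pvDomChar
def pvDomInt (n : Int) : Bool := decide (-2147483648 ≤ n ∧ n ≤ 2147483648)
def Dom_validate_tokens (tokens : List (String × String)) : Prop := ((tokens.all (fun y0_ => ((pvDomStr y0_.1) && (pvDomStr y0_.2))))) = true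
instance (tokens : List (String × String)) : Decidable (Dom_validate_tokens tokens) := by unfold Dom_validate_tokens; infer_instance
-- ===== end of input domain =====

-- B compiles the token list once into a category string and validates it by substring
-- search for six forbidden digrams plus boundary characters (objective: alternative).

-- ===== PORT A =====
-- A's index loop over range(len(tokens)-1), checking tokens[i] / tokens[i+1], as the
-- obvious structural recursion over adjacent pairs; `true` = an early `return None`.
def aLoop : List (String × String) → Bool
  | t :: n :: rest =>
    if t.1 = "number" ∧ n.1 = "parenthesis" ∧ n.2 = "(" then true
    else if t.1 = "parenthesis" ∧ t.2 = ")" ∧ n.1 = "number" then true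
    else if t.1 = "operator" ∧ n.1 = "parenthesis" ∧ n.2 = ")" then true
    else if t.1 = "parenthesis" ∧ t.2 = "(" ∧ n.1 = "operator" then true
    else if t.1 = "number" ∧ n.1 = "number" then true
    else if t.1 = "operator" ∧ n.1 = "operator" then true
    else aLoop (n :: rest)
  | _ => false

def validate_tokens (tokens : List (String × String)) : Option (List (String × String)) :=
  if tokens = [] then none
  else if (tokens.headI).1 = "operator" then none
  else if (tokens.getLastD ("", "")).1 = "operator" then none
  else if aLoop tokens then none
  else some tokens

-- ===== PORT B =====
-- the six forbidden digrams "n(", ")n", "o)", "(o", "nn", "oo"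
def patsB : List (List Char) :=
  [['n','('], [')','n'], ['o',')'], ['(','o'], ['n','n'], ['o','o']]

def catChar (tok : String × String) : Char :=
  if tok.1 = "number" then 'n'
  else if tok.1 = "operator" then 'o'
  else if tok.1 = "parenthesis" ∧ tok.2 = "(" then '('
  else if tok.1 = "parenthesis" ∧ tok.2 = ")" then ')'
  else '?'

def validate_tokens_alt (tokens : List (String × String)) : Option (List (String × String)) :=
  let s := tokens.map catChar
  if s = [] ∨ s.headI = 'o' ∨ s.getLastD '?' = 'o' then none
  else if patsB.any (fun p => PySem.Chars.isIn p s) then none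
  else some tokens

-- ===== PRECONDITION & SPEC =====
def Spec_validate_tokens (tokens : List (String × String)) (out : Option (List (String × String))) : Prop := out = validate_tokens_alt tokens
instance (tokens : List (String × String)) (out : Option (List (String × String))) : Decidable (Spec_validate_tokens tokens out) := by unfold Spec_validate_tokens; infer_instance

-- ===== CLAIM (what is proved, stated in full; the proofs are below) =====
def Claim_equal_validate_tokens : Prop := ∀ (tokens : List (String × String)), Dom_validate_tokens tokens → Spec_validate_tokens tokens (validate_tokens tokens)

-- ===== LEMMAS AND PROOFS =====

lemma cat_operator (t : String × String) : catChar t = 'o' ↔ t.1 = "operator" := by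
  unfold catChar
  split_ifs <;> simp_all

-- A's six-branch test on one adjacent pair = "the key digram is forbidden".
lemma pair_eq (t n : String × String) :
    ((t.1 = "number" ∧ n.1 = "parenthesis" ∧ n.2 = "(") ∨
     (t.1 = "parenthesis" ∧ t.2 = ")" ∧ n.1 = "number") ∨
     (t.1 = "operator" ∧ n.1 = "parenthesis" ∧ n.2 = ")") ∨
     (t.1 = "parenthesis" ∧ t.2 = "(" ∧ n.1 = "operator") ∨
     (t.1 = "number" ∧ n.1 = "number") ∨
     (t.1 = "operator" ∧ n.1 = "operator"))
    ↔ [catChar t, catChar n] ∈ patsB := by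
  unfold catChar patsB
  split_ifs <;> simp_all

-- the loop-shaped restatement of aLoop used below
lemma aLoop_cons (t n : String × String) (rest : List (String × String)) :
    aLoop (t :: n :: rest)
      = (decide ((t.1 = "number" ∧ n.1 = "parenthesis" ∧ n.2 = "(") ∨
                 (t.1 = "parenthesis" ∧ t.2 = ")" ∧ n.1 = "number") ∨
                 (t.1 = "operator" ∧ n.1 = "parenthesis" ∧ n.2 = ")") ∨
                 (t.1 = "parenthesis" ∧ t.2 = "(" ∧ n.1 = "operator") ∨
                 (t.1 = "number" ∧ n.1 = "number") ∨
                 (t.1 = "operator" ∧ n.1 = "operator"))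
         || aLoop (n :: rest)) := by
  simp only [aLoop]
  split_ifs <;> simp_all

-- a forbidden digram (length 2) is an infix of a two-or-more list iff it is the head pair
-- or an infix of the tail
lemma digram_infix_cons (p : List Char) (hp : p.length = 2) (a b : Char) (l : List Char) :
    p <:+: (a :: b :: l) ↔ p = [a, b] ∨ p <:+: (b :: l) := by
  match p, hp with
  | [x, y], _ =>
    rw [List.infix_cons_iff, List.cons_prefix_cons]
    constructor
    · rintro (⟨rfl, hy⟩ | h)
      · rw [List.cons_prefix_cons] at hy
        exact Or.inl (by simp [hy.1])
      · exact Or.inr h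
    · rintro (h | h)
      · simp_all
      · exact Or.inr h

lemma loop_eq (xs : List (String × String)) :
    aLoop xs = patsB.any (fun p => PySem.Chars.isIn p (xs.map catChar)) := by
  induction xs with
  | nil => decide
  | cons t rest ih =>
    cases rest with
    | nil =>
      rw [Bool.eq_iff_iff]
      simp only [aLoop, List.any_eq_true, PySem.Chars.isIn_iff_infix, List.map]
      constructor
      · simp
      · rintro ⟨p, hp, hinf⟩
        have := hinf.length_le
        fin_cases hp <;> simp_all
    | cons n rest' =>
      rw [aLoop_cons, ih]
      rw [Bool.eq_iff_iff]
      simp only [Bool.or_eq_true, decide_eq_true_eq, List.any_eq_true,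
        PySem.Chars.isIn_iff_infix, List.map]
      constructor
      · rintro (h | ⟨p, hp, hinf⟩)
        · refine ⟨[catChar t, catChar n], (pair_eq t n).mp h, ?_⟩
          exact ⟨[], List.map catChar rest', by simp⟩
        · exact ⟨p, hp, hinf.trans ⟨[catChar t], [], by simp⟩⟩
      · rintro ⟨p, hp, hinf⟩
        have hlen : p.length = 2 := by fin_cases hp <;> rfl
        rcases (digram_infix_cons p hlen _ _ _).mp hinf with h | h
        · exact Or.inl ((pair_eq t n).mpr (h ▸ hp))
        · exact Or.inr ⟨p, hp, h⟩

lemma head_eq (tokens : List (String × String)) (h : tokens ≠ []) :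
    ((tokens.map catChar).headI = 'o') ↔ (tokens.headI).1 = "operator" := by
  cases tokens with
  | nil => simp at h
  | cons t rest => simpa using cat_operator t

lemma last_eq (tokens : List (String × String)) (h : tokens ≠ []) :
    ((tokens.map catChar).getLastD '?' = 'o') ↔ (tokens.getLastD ("", "")).1 = "operator" := by
  rw [List.getLastD_eq_getLast?, List.getLastD_eq_getLast?, List.getLast?_map]
  cases hl : tokens.getLast? with
  | none => simp_all [List.getLast?_eq_none_iff]
  | some t => simpa using cat_operator t

-- ===== VERDICT (by name: the statement is the Claim_ definition above) =====
theorem validate_tokens_spec : Claim_equal_validate_tokens := by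
  intro tokens _
  unfold Spec_validate_tokens validate_tokens validate_tokens_alt
  by_cases h0 : tokens = []
  · simp [h0]
  · rw [loop_eq, if_neg h0]
    simp only [List.map_eq_nil_iff, h0, false_or, head_eq tokens h0, last_eq tokens h0]
    split_ifs <;> tauto
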